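-- pv_equiv track=rewrite | github.com/Whatapalaver/aoc_21 | aoc/day10/part1.py | result
-- ===== SOURCE A (Python) =====
-- def incorrect_closer(row):
--     open_and_shut = {"(": ")", "[": "]", "{": "}", "<": ">"}
--
--     openers = open_and_shut.keys()
--     closers = open_and_shut.values()
--
--     openers_stack = []
--
--     for char in row:
--         if char in openers:
--             openers_stack.append(char)
--         elif char in closers:
--             if not openers_stack:
--                 return char
--             else:
--                 last_unclosed_opener = openers_stack.pop()
--                 if not open_and_shut[last_unclosed_opener] == char:
--                     return char
--     return None
--
-- def score_invalid_closers(invalid_closers):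
--     points = {")": 3, "]": 57, "}": 1197, ">": 25137}
--
--     return sum([points[closer] for closer in invalid_closers])
--
-- def parse(input):
--     return [[char for char in row] for row in input]
--
-- def result(input):
--     data = parse(input)
--     invalid_closers = []
--     for row in data:
--         char = incorrect_closer(row)
--         if char is not None:
--             invalid_closers.append(char)
--     return score_invalid_closers(invalid_closers)
-- ===== SOURCE B (Python) =====
-- def result(input):
--     points = {")": 3, "]": 57, "}": 1197, ">": 25137}
--     total = 0
--     for row in input:
--         s = "".join(ch for ch in row if ch in "()[]{}<>")
--         while True:
--             t = s.replace("()", "").replace("[]", "").replace("{}", "").replace("<>", "")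
--             if t == s:
--                 break
--             s = t
--         corrupt = next((ch for ch in s if ch in ")]}>"), None)
--         if corrupt is not None:
--             total += points[corrupt]
--     return total
-- ===== Notes on version B (the rewrite author's own statement) =====
-- stated objective: alternative
-- what changed: A finds the first invalid closer with an explicit opener stack per line; B instead filters each line to its bracket characters and repeatedly deletes adjacent matched pairs ('()','[]','{}','<>') via str.replace until a fixed point, then scores the first remaining closing bracket.
import Mathlib
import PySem

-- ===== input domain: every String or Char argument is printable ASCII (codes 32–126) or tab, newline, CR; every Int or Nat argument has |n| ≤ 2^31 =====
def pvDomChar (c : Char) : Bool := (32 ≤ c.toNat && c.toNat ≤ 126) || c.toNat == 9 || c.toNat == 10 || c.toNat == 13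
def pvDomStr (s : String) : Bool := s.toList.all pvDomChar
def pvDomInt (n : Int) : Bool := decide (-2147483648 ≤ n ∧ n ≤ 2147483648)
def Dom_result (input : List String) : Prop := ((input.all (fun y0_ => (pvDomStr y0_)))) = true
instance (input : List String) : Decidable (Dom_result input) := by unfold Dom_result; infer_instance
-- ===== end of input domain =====

-- B re-implements the corrupt-line scoring by repeated cancellation of adjacent matched
-- bracket pairs (string-rewriting to a fixed point) instead of A's explicit opener stack
-- (objective: alternative algorithm; no speed claim).

-- ===== PORT A =====
-- open_and_shut = {"(": ")", "[": "]", "{": "}", "<": ">"}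
def pvPairs : PySem.Dict Char Char := PySem.Dict.ofList [('(', ')'), ('[', ']'), ('{', '}'), ('<', '>')]
-- points = {")": 3, "]": 57, "}": 1197, ">": 25137}
def pvPoints : PySem.Dict Char Int := PySem.Dict.ofList [(')', 3), (']', 57), ('}', 1197), ('>', 25137)]

-- the for-loop of incorrect_closer, with openers_stack as accumulator
-- (push = cons, pop = head: same last-in-first-out discipline as Python's append/pop)
def icLoop (stack : List Char) : List Char → Option Char
  | [] => none
  | ch :: rest =>
    if ch ∈ (PySem.Dict.keys pvPairs) then icLoop (ch :: stack) rest
    else if ch ∈ (PySem.Dict.values pvPairs) then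
      match stack with
      | [] => some ch
      | last :: stack' =>
        -- open_and_shut[last]: the key is always present (last came from openers); getD is exact here
        if PySem.Dict.getD pvPairs last ' ' = ch then icLoop stack' rest else some ch
    else icLoop stack rest

def incorrectCloser (row : List Char) : Option Char := icLoop [] row

def scoreInvalidClosers (invalid : List Char) : Int :=
  -- points[closer]: the key is always present (only closers are collected); getD is exact here
  (invalid.map (fun c => PySem.Dict.getD pvPoints c 0)).sum

def parseA (input : List String) : List (List Char) :=
  input.map (fun row => row.toList)

def result (input : List String) : Int :=
  let data := parseA input
  let invalid := data.foldl
    (fun acc row => match incorrectCloser row with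
      | some c => acc ++ [c]
      | none => acc) []
  scoreInvalidClosers invalid

-- ===== PORT B =====
-- hand port of s.replace(xy, "") for a two-character pattern and empty replacement:
-- left-to-right, non-overlapping; exact for this pattern shape
def rp (x y : Char) : List Char → List Char
  | a :: b :: rest => if a = x ∧ b = y then rp x y rest else a :: rp x y (b :: rest)
  | l => l

-- one pass of the four replaces in Source B's order
def reduceOnce (l : List Char) : List Char :=
  rp '<' '>' (rp '{' '}' (rp '[' ']' (rp '(' ')' l)))

theorem rp_length_le (x y : Char) (l : List Char) : (rp x y l).length ≤ l.length := by
  fun_induction rp <;> simp_all <;> omega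

theorem rp_eq_or_lt (x y : Char) (l : List Char) :
    rp x y l = l ∨ (rp x y l).length < l.length := by
  fun_induction rp with
  | case1 a b rest h ih =>
      right
      have h2 := rp_length_le x y rest
      simp only [List.length_cons]
      omega
  | case2 a b rest h ih =>
      rcases ih with h1 | h1
      · left; simp [h1]
      · right
        simp only [List.length_cons] at *
        omega
  | case3 => left; rfl

theorem reduceOnce_lt (l : List Char) (h : reduceOnce l ≠ l) :
    (reduceOnce l).length < l.length := by
  unfold reduceOnce at h ⊢
  rcases rp_eq_or_lt '(' ')' l with h1 | h1
  · rw [h1] at h ⊢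
    rcases rp_eq_or_lt '[' ']' l with h2 | h2
    · rw [h2] at h ⊢
      rcases rp_eq_or_lt '{' '}' l with h3 | h3
      · rw [h3] at h ⊢
        rcases rp_eq_or_lt '<' '>' l with h4 | h4
        · exact absurd h4 h
        · exact h4
      · have b4 := rp_length_le '<' '>' (rp '{' '}' l)
        omega
    · have b3 := rp_length_le '{' '}' (rp '[' ']' l)
      have b4 := rp_length_le '<' '>' (rp '{' '}' (rp '[' ']' l))
      omega
  · have b2 := rp_length_le '[' ']' (rp '(' ')' l)
    have b3 := rp_length_le '{' '}' (rp '[' ']' (rp '(' ')' l))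
    have b4 := rp_length_le '<' '>' (rp '{' '}' (rp '[' ']' (rp '(' ')' l)))
    omega

-- the while-loop: replace all four pair patterns until the string stops changing
def collapse (l : List Char) : List Char :=
  let t := reduceOnce l
  if _h : t = l then l else collapse t
termination_by l.length
decreasing_by exact reduceOnce_lt l _h

-- ch in ")]}>"
def isCloserB (c : Char) : Bool := c ∈ [')', ']', '}', '>']
-- ch in "()[]{}<>"
def isBracketB (c : Char) : Bool := c ∈ ['(', ')', '[', ']', '{', '}', '<', '>']

def result_alt (input : List String) : Int :=
  input.foldl (fun total row =>
    let s := collapse (row.toList.filter isBracketB)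
    match s.find? isCloserB with
    | some c => total + PySem.Dict.getD pvPoints c 0
    | none => total) 0

-- ===== PRECONDITION & SPEC =====
def Spec_result (input : List String) (out : Int) : Prop := out = result_alt input
instance (input : List String) (out : Int) : Decidable (Spec_result input out) := by unfold Spec_result; infer_instance

-- ===== CLAIM (what is proved, stated in full; the proofs are below) =====
def Claim_equal_result : Prop := ∀ (input : List String), Dom_result input → Spec_result input (result input)

-- ===== LEMMAS AND PROOFS =====

theorem keys_pvPairs : PySem.Dict.keys pvPairs = ['(', '[', '{', '<'] := by decide
theorem values_pvPairs : PySem.Dict.values pvPairs = [')', ']', '}', '>'] := by decide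

theorem icLoop_cons (st : List Char) (ch : Char) (rest : List Char) :
    icLoop st (ch :: rest) =
      if ch ∈ (PySem.Dict.keys pvPairs) then icLoop (ch :: st) rest
      else if ch ∈ (PySem.Dict.values pvPairs) then
        match st with
        | [] => some ch
        | last :: stack' =>
          if PySem.Dict.getD pvPairs last ' ' = ch then icLoop stack' rest else some ch
      else icLoop st rest := rfl

-- non-bracket characters are skipped by A's loop
theorem icLoop_filter (l : List Char) : ∀ st, icLoop st (l.filter isBracketB) = icLoop st l := by
  induction l with
  | nil => intro st; rfl
  | cons a l ih =>
    intro st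
    by_cases hb : isBracketB a = true
    · rw [List.filter_cons_of_pos hb]
      simp only [icLoop]
      split_ifs with h1 h2
      · exact ih _
      · cases st with
        | nil => rfl
        | cons o st' =>
          simp only
          split_ifs with h3
          · exact ih _
          · rfl
      · exact ih _
    · rw [List.filter_cons_of_neg (by simp [hb])]
      have h1 : a ∉ PySem.Dict.keys pvPairs := by
        rw [keys_pvPairs]; simp [isBracketB] at hb ⊢; tauto
      have h2 : a ∉ PySem.Dict.values pvPairs := by
        rw [values_pvPairs]; simp [isBracketB] at hb ⊢; tauto
      simp only [icLoop]
      rw [if_neg h1, if_neg h2]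
      exact ih _

-- deleting occurrences of a matched pair does not change A's loop's answer
theorem icLoop_rp (x y : Char) (hx : x ∈ PySem.Dict.keys pvPairs)
    (hyk : y ∉ PySem.Dict.keys pvPairs) (hyv : y ∈ PySem.Dict.values pvPairs)
    (hd : PySem.Dict.getD pvPairs x ' ' = y) (l : List Char) :
    ∀ st, icLoop st (rp x y l) = icLoop st l := by
  fun_induction rp with
  | case1 a b rest h ih =>
    intro st
    obtain ⟨rfl, rfl⟩ := h
    rw [icLoop_cons, if_pos hx, icLoop_cons, if_neg hyk, if_pos hyv]
    simp only
    rw [if_pos hd]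
    exact ih st
  | case2 a b rest h ih =>
    intro st
    rw [icLoop_cons st a (rp x y (b :: rest)), icLoop_cons st a (b :: rest)]
    split_ifs with h1 h2
    · exact ih _
    · cases st with
      | nil => rfl
      | cons o st' =>
        simp only
        split_ifs with h3
        · exact ih _
        · rfl
    · exact ih _
  | case3 l h => intro st; rfl

theorem icLoop_reduceOnce (l : List Char) (st : List Char) :
    icLoop st (reduceOnce l) = icLoop st l := by
  unfold reduceOnce
  rw [icLoop_rp '<' '>' (by decide) (by decide) (by decide) (by decide)]
  rw [icLoop_rp '{' '}' (by decide) (by decide) (by decide) (by decide)]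
  rw [icLoop_rp '[' ']' (by decide) (by decide) (by decide) (by decide)]
  rw [icLoop_rp '(' ')' (by decide) (by decide) (by decide) (by decide)]

theorem icLoop_collapse (l : List Char) (st : List Char) :
    icLoop st (collapse l) = icLoop st l := by
  fun_induction collapse with
  | case1 l t h => rfl
  | case2 l t h ih => rw [ih, icLoop_reduceOnce]

theorem collapse_fixed (l : List Char) : reduceOnce (collapse l) = collapse l := by
  fun_induction collapse with
  | case1 l t h => exact h
  | case2 l t h ih => exact ih

theorem mem_rp (x y : Char) (l : List Char) : ∀ a ∈ rp x y l, a ∈ l := by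
  fun_induction rp with
  | case1 a b rest h ih => intro c hc; simp [ih c hc]
  | case2 a b rest h ih =>
    intro c hc
    simp only [List.mem_cons] at hc ⊢
    rcases hc with rfl | hc
    · left; rfl
    · have := ih c hc
      simp only [List.mem_cons] at this
      tauto
  | case3 l h => intro c hc; exact hc

theorem mem_reduceOnce (l : List Char) : ∀ a ∈ reduceOnce l, a ∈ l := by
  intro a ha
  exact mem_rp _ _ _ _ (mem_rp _ _ _ _ (mem_rp _ _ _ _ (mem_rp _ _ _ _ ha)))

theorem mem_collapse (l : List Char) : ∀ a ∈ collapse l, a ∈ l := by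
  fun_induction collapse with
  | case1 l t h => intro a ha; exact ha
  | case2 l t h ih => intro a ha; exact mem_reduceOnce l a (ih a ha)

def Matching (a b : Char) : Prop :=
  (a = '(' ∧ b = ')') ∨ (a = '[' ∧ b = ']') ∨ (a = '{' ∧ b = '}') ∨ (a = '<' ∧ b = '>')

theorem rp_fix_chain (x y : Char) (l : List Char) (h : rp x y l = l) :
    l.IsChain (fun a b => ¬(a = x ∧ b = y)) := by
  fun_induction rp with
  | case1 a b rest hm ih =>
    exfalso
    have h1 := rp_length_le x y rest
    have h2 := congrArg List.length h
    simp only [List.length_cons] at h2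
    omega
  | case2 a b rest hm ih =>
    have h1 : rp x y (b :: rest) = b :: rest := by
      injection h
    rw [List.isChain_cons_cons]
    exact ⟨hm, ih h1⟩
  | case3 l hl =>
    rcases l with _ | ⟨a, _ | ⟨b, t⟩⟩
    · exact List.isChain_nil
    · exact List.isChain_singleton _
    · exact absurd rfl (hl a b t)

theorem chain'_and {α : Type} {P Q : α → α → Prop} (l : List α)
    (hp : l.IsChain P) (hq : l.IsChain Q) : l.IsChain (fun a b => P a b ∧ Q a b) := by
  induction l with
  | nil => exact List.isChain_nil
  | cons a t ih =>
    cases t with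
    | nil => exact List.isChain_singleton _
    | cons b t' =>
      rw [List.isChain_cons_cons] at hp hq ⊢
      exact ⟨⟨hp.1, hq.1⟩, ih hp.2 hq.2⟩

theorem fixed_noAdj (l : List Char) (h : reduceOnce l = l) :
    l.IsChain (fun a b => ¬ Matching a b) := by
  have hlen := congrArg List.length h
  unfold reduceOnce at h hlen
  have e1 : rp '(' ')' l = l := by
    rcases rp_eq_or_lt '(' ')' l with h1 | h1
    · exact h1
    · have a2 := rp_length_le '[' ']' (rp '(' ')' l)
      have a3 := rp_length_le '{' '}' (rp '[' ']' (rp '(' ')' l))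
      have a4 := rp_length_le '<' '>' (rp '{' '}' (rp '[' ']' (rp '(' ')' l)))
      omega
  rw [e1] at h hlen
  have e2 : rp '[' ']' l = l := by
    rcases rp_eq_or_lt '[' ']' l with h1 | h1
    · exact h1
    · have a3 := rp_length_le '{' '}' (rp '[' ']' l)
      have a4 := rp_length_le '<' '>' (rp '{' '}' (rp '[' ']' l))
      omega
  rw [e2] at h hlen
  have e3 : rp '{' '}' l = l := by
    rcases rp_eq_or_lt '{' '}' l with h1 | h1
    · exact h1
    · have a4 := rp_length_le '<' '>' (rp '{' '}' l)
      omega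
  rw [e3] at h
  have c1 := rp_fix_chain _ _ _ e1
  have c2 := rp_fix_chain _ _ _ e2
  have c3 := rp_fix_chain _ _ _ e3
  have c4 := rp_fix_chain _ _ _ h
  refine List.IsChain.imp ?_ (chain'_and l (chain'_and l c1 c2) (chain'_and l c3 c4))
  intro a b hab
  unfold Matching
  tauto

-- a successful lookup open_and_shut[o] == c means (o, c) is one of the four pairs
theorem getD_pvPairs_matching (o a : Char) (h : PySem.Dict.getD pvPairs o ' ' = a)
    (ha : isCloserB a = true) : Matching o a := by
  have hp : pvPairs = PySem.Dict.mk [('(', ')'), ('[', ']'), ('{', '}'), ('<', '>')] := by decide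
  rw [hp] at h
  simp only [PySem.Dict.getD, PySem.Dict.get?_mk_cons] at h
  split_ifs at h with g1 g2 g3 g4
  · left; refine ⟨?_, by simpa using h.symm⟩; have := g1; simp at this; exact this.symm
  · right; left; refine ⟨?_, by simpa using h.symm⟩; have := g2; simp at this; exact this.symm
  · right; right; left; refine ⟨?_, by simpa using h.symm⟩; have := g3; simp at this; exact this.symm
  · right; right; right; refine ⟨?_, by simpa using h.symm⟩; have := g4; simp at this; exact this.symm
  · exfalso
    simp only [PySem.Dict.get?] at h
    simp at h
    rw [← h] at ha
    simp [isCloserB] at ha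

-- on an irreducible all-bracket string the first closer is the answer of A's loop
theorem icLoop_irreducible (l : List Char)
    (hb : ∀ a ∈ l, isBracketB a = true)
    (hc : l.IsChain (fun a b => ¬ Matching a b)) :
    ∀ st, (∀ o c, st.head? = some o → l.head? = some c → ¬ Matching o c) →
      icLoop st l = l.find? isCloserB := by
  induction l with
  | nil => intro st _; rfl
  | cons a l ih =>
    intro st hok
    have hba : isBracketB a = true := hb a (by simp)
    by_cases ha : a ∈ PySem.Dict.keys pvPairs
    · -- opener: pushed, and not a closer
      have hcl : isCloserB a = false := by
        rw [keys_pvPairs] at ha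
        simp at ha
        rcases ha with rfl | rfl | rfl | rfl <;> decide
      rw [icLoop_cons, if_pos ha, List.find?_cons_of_neg (by simp [hcl])]
      apply ih (fun c hcm => hb c (by simp [hcm])) (List.IsChain.tail hc)
      intro o c ho hcx
      simp at ho
      subst ho
      rcases l with _ | ⟨c', l'⟩
      · simp at hcx
      · simp at hcx
        subst hcx
        exact (List.isChain_cons_cons.mp hc).1
    · -- closer: returned, and it is the first closer
      have hv : a ∈ PySem.Dict.values pvPairs := by
        rw [values_pvPairs]
        rw [keys_pvPairs] at ha
        simp [isBracketB] at hba
        simp at ha ⊢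
        tauto
      have hcl : isCloserB a = true := by
        rw [values_pvPairs] at hv
        simp [isCloserB]
        simpa using hv
      rw [icLoop_cons, if_neg ha, if_pos hv, List.find?_cons_of_pos (by simp [hcl])]
      cases st with
      | nil => rfl
      | cons o st' =>
        simp only
        rw [if_neg]
        intro hd
        exact hok o a rfl rfl (getD_pvPairs_matching o a hd hcl)

-- per-row equivalence: A's stack scan = B's collapse-then-first-closer
theorem row_eq (row : List Char) :
    incorrectCloser row = (collapse (row.filter isBracketB)).find? isCloserB := by
  unfold incorrectCloser
  rw [← icLoop_filter row, ← icLoop_collapse (row.filter isBracketB)]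
  apply icLoop_irreducible
  · intro a ha
    have := mem_collapse _ a ha
    exact List.of_mem_filter this
  · exact fixed_noAdj _ (collapse_fixed _)
  · intro o c ho
    simp at ho

def optScore (row : List Char) : Int :=
  match incorrectCloser row with
  | some c => PySem.Dict.getD pvPoints c 0
  | none => 0

-- A's collect-then-sum equals the running sum of per-row scores
theorem collect_sum (rows : List (List Char)) : ∀ acc : List Char,
    scoreInvalidClosers (rows.foldl
      (fun acc row => match incorrectCloser row with
        | some c => acc ++ [c]
        | none => acc) acc)
      = scoreInvalidClosers acc + (rows.map optScore).sum := by
  induction rows with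
  | nil => intro acc; simp
  | cons r rows ih =>
    intro acc
    simp only [List.foldl_cons, List.map_cons, List.sum_cons]
    rw [ih]
    unfold optScore
    cases h : incorrectCloser r with
    | none => simp [h]
    | some c =>
      simp [h, scoreInvalidClosers]
      ring

theorem alt_fold (rows : List String) : ∀ t : Int,
    rows.foldl (fun total row =>
      let s := collapse (row.toList.filter isBracketB)
      match s.find? isCloserB with
      | some c => total + PySem.Dict.getD pvPoints c 0
      | none => total) t
    = t + (rows.map (fun row => optScore row.toList)).sum := by
  induction rows with
  | nil => intro t; simp
  | cons r rows ih =>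
    intro t
    simp only [List.foldl_cons, List.map_cons, List.sum_cons]
    rw [ih]
    have hr : optScore r.toList
        = match (collapse (r.toList.filter isBracketB)).find? isCloserB with
          | some c => PySem.Dict.getD pvPoints c 0
          | none => (0 : Int) := by
      unfold optScore
      rw [row_eq]
    rw [hr]
    cases (collapse (r.toList.filter isBracketB)).find? isCloserB with
    | none => simp
    | some c => simp; ring

-- ===== VERDICT (by name: the statement is the Claim_ definition above) =====
theorem result_spec : Claim_equal_result := by
  intro input _
  unfold Spec_result result result_alt parseA
  rw [alt_fold, collect_sum]
  simp [scoreInvalidClosers, List.map_map, Function.comp_def]
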